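-- pv_equiv track=rewrite | github.com/dkhmelenko/AoC-2022 | day_08/task.py | score_left
-- ===== SOURCE A (Python) =====
-- def score_left(i, j, matrix, curr):
--     if j < 0:
--         return 0
--     visible = curr > matrix[i][j]
--     if visible:
--         return score_left(i, j - 1, matrix, curr) + 1
--     else:
--         return 1
-- ===== SOURCE B (Python) =====
-- def score_left(i, j, matrix, curr):
--     count = 0
--     while j >= 0:
--         count += 1
--         if curr > matrix[i][j]:
--             j -= 1
--         else:
--             break
--     return count
-- ===== Notes on version B (the rewrite author's own statement) =====
-- stated objective: simpler
-- what changed: Replaces the non-tail recursion (which adds 1 on the way back up) with an iterative while loop maintaining a counter, counting the blocking tree inclusively and returning 0 when j starts negative.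
import Mathlib
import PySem

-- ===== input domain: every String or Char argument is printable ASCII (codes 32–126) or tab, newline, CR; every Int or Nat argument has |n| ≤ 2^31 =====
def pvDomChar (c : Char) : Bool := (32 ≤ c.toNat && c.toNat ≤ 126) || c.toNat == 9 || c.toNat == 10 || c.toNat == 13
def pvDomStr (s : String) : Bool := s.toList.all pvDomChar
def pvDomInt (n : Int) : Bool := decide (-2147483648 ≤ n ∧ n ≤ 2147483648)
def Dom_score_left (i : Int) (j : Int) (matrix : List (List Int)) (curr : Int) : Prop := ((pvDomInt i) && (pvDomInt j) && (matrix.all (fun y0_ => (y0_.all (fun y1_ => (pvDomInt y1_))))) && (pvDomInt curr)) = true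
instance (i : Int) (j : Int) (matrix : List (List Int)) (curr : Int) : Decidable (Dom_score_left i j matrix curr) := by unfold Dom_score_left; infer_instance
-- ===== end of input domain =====

-- B replaces A's non-tail recursion with an iterative counter loop (same cost, plainer control flow);
-- return-value equivalence is proved on all inputs where A's matrix[i][j] accesses are in range.

-- ===== PORT A =====
-- literal port of A's recursion; the 'none' branch (IndexError in Python) is outside Pre_
def score_left (i : Int) (j : Int) (matrix : List (List Int)) (curr : Int) : Int :=
  if _h : j < 0 then 0
  else
    match (PySem.List.pyGet? matrix i).bind (fun row => PySem.List.pyGet? row j) with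
    | none => 0
    | some v =>
      if curr > v then score_left i (j - 1) matrix curr + 1 else 1
termination_by (j + 1).toNat
decreasing_by omega

-- ===== PORT B =====
-- literal port of B's while loop: 'count' is the loop counter
def scoreLeftLoop (i : Int) (j : Int) (matrix : List (List Int)) (curr : Int) (count : Int) : Int :=
  if _h : j ≥ 0 then
    let count := count + 1
    match (PySem.List.pyGet? matrix i).bind (fun row => PySem.List.pyGet? row j) with
    | none => count
    | some v =>
      if curr > v then scoreLeftLoop i (j - 1) matrix curr count else count
  else count
termination_by (j + 1).toNat
decreasing_by omega

def score_left_alt (i : Int) (j : Int) (matrix : List (List Int)) (curr : Int) : Int :=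
  scoreLeftLoop i j matrix curr 0

-- ===== PRECONDITION & SPEC =====
-- Pre_ excludes exactly the inputs where Python raises IndexError: j ≥ 0 with matrix[i]
-- missing or j beyond the row's length (both programs raise there).
def Pre_score_left (i : Int) (j : Int) (matrix : List (List Int)) (curr : Int) : Prop :=
  j < 0 ∨ ((PySem.List.pyGet? matrix i).isSome = true ∧
           j < (((PySem.List.pyGet? matrix i).getD []).length : Int))
instance (i : Int) (j : Int) (matrix : List (List Int)) (curr : Int) : Decidable (Pre_score_left i j matrix curr) := by unfold Pre_score_left; infer_instance

def pvWitness_score_left : Int × Int × List (List Int) × Int := (1, 2, [[3, 1, 4], [1, 5, 9]], 5)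

def Spec_score_left (i : Int) (j : Int) (matrix : List (List Int)) (curr : Int) (out : Int) : Prop := out = score_left_alt i j matrix curr
instance (i : Int) (j : Int) (matrix : List (List Int)) (curr : Int) (out : Int) : Decidable (Spec_score_left i j matrix curr out) := by unfold Spec_score_left; infer_instance

-- ===== CLAIM (what is proved, stated in full; the proofs are below) =====
def Claim_equal_score_left : Prop := ∀ (i : Int) (j : Int) (matrix : List (List Int)) (curr : Int), Dom_score_left i j matrix curr → Pre_score_left i j matrix curr → Spec_score_left i j matrix curr (score_left i j matrix curr)

-- ===== LEMMAS AND PROOFS =====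

-- loop invariant: under Pre_, the loop from counter c returns c + A's result
theorem scoreLeftLoop_eq (i : Int) (matrix : List (List Int)) (_curr : Int) :
    ∀ (j c : Int), Pre_score_left i j matrix curr →
      scoreLeftLoop i j matrix curr c = c + score_left i j matrix curr := by
  intro j
  induction hn : (j + 1).toNat using Nat.strong_induction_on generalizing j with
  | _ n ih =>
    intro c hpre
    rw [scoreLeftLoop, score_left]
    by_cases hj : j < 0
    · simp [hj, not_le.mpr hj]
    · have hj' : j ≥ 0 := not_lt.mp hj
      rcases hpre with h | ⟨hs, hlen⟩
      · omega
      · rcases Option.isSome_iff_exists.mp hs with ⟨row, hrow⟩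
        have hjr : j < (row.length : Int) := by simpa [hrow] using hlen
        have hget : PySem.List.pyGet? row j = some (row[j.toNat]?.getD 0) := by
          rw [PySem.List.pyGet?_of_nonneg row hj']
          have hlt : j.toNat < row.length := by omega
          simp [List.getElem?_eq_getElem hlt]
        simp only [hj, dite_false, hj', dite_true, hrow, Option.bind_some, hget]
        set v := row[j.toNat]?.getD 0 with hv
        by_cases hc : curr > v
        · simp only [hc, if_true]
          have hpre' : Pre_score_left i (j - 1) matrix curr := by
            by_cases hz : j - 1 < 0
            · exact Or.inl hz
            · exact Or.inr ⟨hs, by rw [hrow]; simp only [Option.getD_some]; omega⟩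
          rw [ih (j - 1 + 1).toNat (by omega) (j - 1) rfl (c + 1) hpre']
          ring
        · simp [hc]

-- ===== VERDICT (by name: the statement is the Claim_ definition above) =====
theorem score_left_spec : Claim_equal_score_left := by
  intro i j matrix curr _ hpre
  unfold Spec_score_left score_left_alt
  rw [scoreLeftLoop_eq i matrix curr j 0 hpre]
  ring
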